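-- pv_equiv track=rewrite | github.com/dadecoza/mesh2aprs | m2a_aprs.py | aprs_passcode
-- ===== SOURCE A (Python) =====
-- def aprs_passcode(callsign: str) -> int:
--     callsign = callsign.upper()
--     hash_val = 0x73e2  # starting seed
--
--     for i, c in enumerate(callsign):
--         if i % 2 == 0:
--             hash_val ^= ord(c) << 8
--         else:
--             hash_val ^= ord(c)
--
--     return hash_val & 0x7fff  # keep only 15 bits
-- ===== SOURCE B (Python) =====
-- def aprs_passcode(callsign: str) -> int:
--     cs = callsign.upper()
--     high = 0
--     for c in cs[0::2]:
--         high ^= ord(c)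
--     low = 0
--     for c in cs[1::2]:
--         low ^= ord(c)
--     return (0x73e2 ^ (high << 8) ^ low) & 0x7fff
-- ===== Notes on version B (the rewrite author's own statement) =====
-- stated objective: faster
-- what changed: Instead of one running hash updated per character with an index-parity branch, B splits the callsign into its even-position and odd-position slices, XOR-reduces each slice to a byte in two separate branch-free passes, and combines the two bytes with the seed in one closed expression; valid because XOR is associative and commutative, so the shifted even-position contributions and the odd-position contributions accumulate independently.
import Mathlib
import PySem

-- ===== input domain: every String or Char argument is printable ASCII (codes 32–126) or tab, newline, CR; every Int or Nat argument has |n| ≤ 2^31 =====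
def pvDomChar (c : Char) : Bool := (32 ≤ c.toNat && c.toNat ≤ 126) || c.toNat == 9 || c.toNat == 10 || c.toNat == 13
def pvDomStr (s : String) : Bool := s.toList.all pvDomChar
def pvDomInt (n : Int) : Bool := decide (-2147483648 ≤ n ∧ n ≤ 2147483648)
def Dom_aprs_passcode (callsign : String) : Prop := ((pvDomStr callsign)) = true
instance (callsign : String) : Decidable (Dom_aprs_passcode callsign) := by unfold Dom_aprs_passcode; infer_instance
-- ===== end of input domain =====

-- B replaces A's single running hash with its per-index parity branch by two staged passes:
-- it XOR-reduces the even-position slice and the odd-position slice separately and combines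
-- the two bytes with the seed in one final expression (XOR is associative and commutative).
-- ===== PORT A =====
def aprs_passcode (callsign : String) : Int :=
  let cs := PySem.Str.upper callsign
  let hash_val : Int := 0x73e2
  let hash_val := (PySem.List.enumerate cs.toList 0).foldl
    (fun h p =>
      if PySem.Int.mod p.1 2 = 0 then PySem.Int.bxor h ((p.2.toNat : Int) <<< 8)
      else PySem.Int.bxor h (p.2.toNat : Int)) hash_val
  PySem.Int.band hash_val 0x7fff

-- ===== PORT B =====
-- cs[0::2]: PySem has no step slices, so the step-2 slice is ported by hand; exact for a
-- nonnegative start and step 2 (every second element starting from the head).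
def pvStride2 : List Char → List Char
  | [] => []
  | [c] => [c]
  | c :: _ :: rest => c :: pvStride2 rest

-- the 'for c in …: acc ^= ord(c)' loops of Source B
def pvXorAll (l : List Char) : Int :=
  l.foldl (fun v c => PySem.Int.bxor v (c.toNat : Int)) 0

def aprs_passcode_alt (callsign : String) : Int :=
  let cs := (PySem.Str.upper callsign).toList
  let high := pvXorAll (pvStride2 cs)            -- cs[0::2]
  let low := pvXorAll (pvStride2 (cs.drop 1))    -- cs[1::2]
  PySem.Int.band (PySem.Int.bxor (PySem.Int.bxor 0x73e2 (high <<< 8)) low) 0x7fff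

-- ===== PRECONDITION & SPEC =====
def Spec_aprs_passcode (callsign : String) (out : Int) : Prop := out = aprs_passcode_alt callsign
instance (callsign : String) (out : Int) : Decidable (Spec_aprs_passcode callsign out) := by unfold Spec_aprs_passcode; infer_instance

-- ===== CLAIM (what is proved, stated in full; the proofs are below) =====
def Claim_equal_aprs_passcode : Prop := ∀ (callsign : String), Dom_aprs_passcode callsign → Spec_aprs_passcode callsign (aprs_passcode callsign)

-- ===== LEMMAS AND PROOFS =====

theorem pvStride2_cons_drop (d : Char) (rest : List Char) :
    pvStride2 (d :: rest) = d :: pvStride2 (rest.drop 1) := by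
  cases rest <;> simp [pvStride2]

-- XOR fold over Nat with the seed pulled out
theorem pvNatXor_seed (l : List Char) (a : Nat) :
    l.foldl (fun v c => v ^^^ c.toNat) a = a ^^^ l.foldl (fun v c => v ^^^ c.toNat) 0 := by
  induction l generalizing a with
  | nil => simp
  | cons c rest ih =>
      simp only [List.foldl_cons]
      rw [ih (a ^^^ c.toNat), ih (0 ^^^ c.toNat)]
      simp [Nat.xor_assoc]

theorem pvXorAll_cast (l : List Char) :
    pvXorAll l = ((l.foldl (fun v c => v ^^^ c.toNat) 0 : Nat) : Int) := by
  have key : ∀ (l : List Char) (a : Nat),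
      l.foldl (fun v c => PySem.Int.bxor v (c.toNat : Int)) ((a : Nat) : Int)
        = ((l.foldl (fun v c => v ^^^ c.toNat) a : Nat) : Int) := by
    intro l
    induction l with
    | nil => intro a; simp
    | cons c rest ih =>
        intro a
        simp only [List.foldl_cons]
        rw [PySem.Int.bxor_natCast]
        exact ih (a ^^^ c.toNat)
  simpa using key l 0

theorem pv_shl_xor (a b : Nat) : (a ^^^ b) <<< 8 = a <<< 8 ^^^ b <<< 8 := by
  apply Nat.eq_of_testBit_eq; intro i
  simp [Nat.testBit_shiftLeft, Nat.testBit_xor]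
  by_cases h : 8 ≤ i <;> simp [h]

theorem pv_cast_shl (a : Nat) : ((a : Int) <<< 8) = ((a <<< 8 : Nat) : Int) := rfl

-- A's loop computes seed ^ (XOR of even-position codes << 8) ^ (XOR of odd-position codes)
theorem pv_key (l : List Char) (n : Int) (hn : PySem.Int.mod n 2 = 0) (h : Nat) :
    (PySem.List.enumerate l n).foldl
      (fun h p =>
        if PySem.Int.mod p.1 2 = 0 then PySem.Int.bxor h ((p.2.toNat : Int) <<< 8)
        else PySem.Int.bxor h (p.2.toNat : Int)) ((h : Nat) : Int)
    = (((h ^^^ ((pvStride2 l).foldl (fun v c => v ^^^ c.toNat) 0 <<< 8)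
          ^^^ (pvStride2 (l.drop 1)).foldl (fun v c => v ^^^ c.toNat) 0 : Nat)) : Int) := by
  match l with
  | [] => simp [PySem.List.enumerate_nil, pvStride2]
  | [c] =>
      simp only [PySem.List.enumerate_cons, PySem.List.enumerate_nil, List.foldl_cons,
        List.foldl_nil, List.drop_succ_cons, List.drop_nil, pvStride2]
      rw [if_pos hn, pv_cast_shl, PySem.Int.bxor_natCast]
      simp
  | c :: d :: rest =>
      have h2 : (0:Int) < 2 := by omega
      have hn' := hn
      rw [PySem.Int.mod_eq_emod_of_pos h2] at hn'
      have hn2 : PySem.Int.mod (n + 1 + 1) 2 = 0 := by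
        rw [PySem.Int.mod_eq_emod_of_pos h2]; omega
      simp only [PySem.List.enumerate_cons, List.foldl_cons]
      rw [if_pos hn, if_neg (by rw [PySem.Int.mod_eq_emod_of_pos h2]; omega)]
      rw [pv_cast_shl, PySem.Int.bxor_natCast, PySem.Int.bxor_natCast]
      rw [pv_key rest (n + 1 + 1) hn2 (h ^^^ c.toNat <<< 8 ^^^ d.toNat)]
      rw [show pvStride2 (c :: d :: rest) = c :: pvStride2 rest from rfl,
        List.drop_succ_cons, List.drop_zero, pvStride2_cons_drop]
      simp only [List.foldl_cons, Nat.zero_xor]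
      rw [pvNatXor_seed (pvStride2 rest) c.toNat,
        pvNatXor_seed (pvStride2 (rest.drop 1)) d.toNat]
      congr 1
      rw [pv_shl_xor]
      simp [Nat.xor_assoc, Nat.xor_comm, Nat.xor_left_comm]

-- ===== VERDICT (by name: the statement is the Claim_ definition above) =====
theorem aprs_passcode_spec : Claim_equal_aprs_passcode := by
  intro callsign _
  unfold Spec_aprs_passcode aprs_passcode aprs_passcode_alt
  simp only []
  rw [show ((0x73e2 : Int)) = (((0x73e2 : Nat) : Int)) from rfl,
    pv_key _ 0 (by decide) 0x73e2,
    pvXorAll_cast, pvXorAll_cast, pv_cast_shl, PySem.Int.bxor_natCast, PySem.Int.bxor_natCast]
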